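-- pv_equiv track=rewrite | github.com/jeffbrianho/python_110 | small_problems/easy1/letter_swap.py | swap
-- ===== SOURCE A (Python) =====
-- def swap(s):
--     string_list = s.split(' ')
--
--     new_string_list = []
--
--     for word in string_list:
--         if len(word) > 1:
--             new_string_list.append(word[-1] + word[1:len(word)-1] + word[0])
--         else:
--             new_string_list.append(word)
--
--     final_string = ' '.join(new_string_list)
--     return final_string
-- ===== SOURCE B (Python) =====
-- def swap(s):
--     # Single left-to-right scan: copy spaces through, rewrite each maximal
--     # run of non-space characters in place (last + middle + first).
--     out = []
--     i = 0
--     n = len(s)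
--     while i < n:
--         if s[i] == ' ':
--             out.append(' ')
--             i += 1
--         else:
--             j = i
--             while j < n and s[j] != ' ':
--                 j += 1
--             word = s[i:j]
--             if len(word) <= 1:
--                 out.append(word)
--             else:
--                 out.append(word[-1] + word[1:-1] + word[0])
--             i = j
--     return ''.join(out)
-- ===== Notes on version B (the rewrite author's own statement) =====
-- stated objective: alternative
-- what changed: Replaces space-split/loop/join pipeline with a single in-place scan over the characters that copies spaces through and rewrites each maximal non-space run directly, never materialising the word list.
import Mathlib
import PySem

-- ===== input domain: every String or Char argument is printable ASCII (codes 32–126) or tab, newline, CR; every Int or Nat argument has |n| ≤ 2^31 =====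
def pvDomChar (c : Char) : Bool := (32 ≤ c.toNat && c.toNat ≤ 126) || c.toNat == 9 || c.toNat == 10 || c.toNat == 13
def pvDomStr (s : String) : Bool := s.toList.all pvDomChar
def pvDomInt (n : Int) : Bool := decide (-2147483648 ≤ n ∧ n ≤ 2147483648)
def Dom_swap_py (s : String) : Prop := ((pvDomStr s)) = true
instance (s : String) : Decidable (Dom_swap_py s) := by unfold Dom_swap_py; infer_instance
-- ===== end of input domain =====

-- B replaces A's space-split/loop/join pipeline with one left-to-right scan that rewrites each maximal non-space run in place (alternative decomposition, same cost).


-- ===== PORT A =====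
-- the loop appends word[-1] + word[1:len(word)-1] + word[0] (pyGet? is some here: the guard gives len > 1)
def swap_py (s : String) : String :=
  let string_list := PySem.Chars.splitOn s.toList [' ']
  let new_string_list := string_list.foldl (fun acc word =>
    if 1 < word.length then
      acc ++ [(PySem.List.pyGet? word (-1)).toList
              ++ PySem.List.slice word (some 1) (some ((word.length : Int) - 1))
              ++ (PySem.List.pyGet? word 0).toList]
    else
      acc ++ [word]) []
  String.ofList (PySem.Chars.join [' '] new_string_list)

-- ===== PORT B =====
-- Source B's word rewrite: word unchanged if len(word) <= 1, else word[-1] + word[1:-1] + word[0]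

def swapRunB (w : List Char) : List Char :=
  if w.length ≤ 1 then w
  else (PySem.List.pyGet? w (-1)).toList
       ++ PySem.List.slice w (some 1) (some (-1))
       ++ (PySem.List.pyGet? w 0).toList

def scanB : List Char → List Char
  | [] => []
  | c :: rest =>
    if c = ' ' then ' ' :: scanB rest
    else swapRunB ((c :: rest).takeWhile (· ≠ ' ')) ++ scanB ((c :: rest).dropWhile (· ≠ ' '))
termination_by cs => cs.length
decreasing_by
  · simp only [List.length_cons]; omega
  · rename_i hc
    simp only [List.dropWhile_cons, List.length_cons]
    rw [if_pos (by simp [hc])]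
    exact Nat.lt_succ_of_le (List.length_dropWhile_le _ _)

def swap_py_alt (s : String) : String := String.ofList (scanB s.toList)

-- ===== PRECONDITION & SPEC =====
def Spec_swap_py (s : String) (out : String) : Prop := out = swap_py_alt s
instance (s : String) (out : String) : Decidable (Spec_swap_py s out) := by unfold Spec_swap_py; infer_instance

-- ===== CLAIM (what is proved, stated in full; the proofs are below) =====
def Claim_equal_swap_py : Prop := ∀ (s : String), Dom_swap_py s → Spec_swap_py s (swap_py s)

-- ===== LEMMAS AND PROOFS =====

theorem scanB_nil : scanB [] = [] := by rw [scanB]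
theorem scanB_cons (c : Char) (rest : List Char) : scanB (c :: rest) =
    if c = ' ' then ' ' :: scanB rest
    else swapRunB ((c :: rest).takeWhile (· ≠ ' ')) ++ scanB ((c :: rest).dropWhile (· ≠ ' ')) := by
  rw [scanB]

def split1 : List Char → List (List Char)
  | [] => [[]]
  | c :: rest =>
    if c = ' ' then [] :: split1 rest
    else
      match split1 rest with
      | [] => [[c]]
      | w :: ws => (c :: w) :: ws

theorem split1_ne_nil (cs : List Char) : split1 cs ≠ [] := by
  cases cs with
  | nil => simp [split1]
  | cons c rest =>
    simp only [split1]
    split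
    · simp
    · split <;> simp

theorem go_eq_split1 (fuel : Nat) (l cur : List Char) (acc : List (List Char))
    (h : l.length < fuel) :
    PySem.Chars.splitOn.go [' '] fuel l cur acc =
      acc.reverse ++ (match split1 l with
                      | [] => []
                      | w :: ws => (cur.reverse ++ w) :: ws) := by
  induction fuel generalizing l cur acc with
  | zero => omega
  | succ f ih =>
    cases l with
    | nil =>
      rw [PySem.Chars.splitOn.go.eq_def]
      simp [split1]
    | cons c rest =>
      rw [PySem.Chars.splitOn.go.eq_def]
      simp only [List.length_cons] at h
      show (if [' '].isPrefixOf (c :: rest) = true then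
              PySem.Chars.splitOn.go [' '] f (List.drop [' '].length (c :: rest)) [] (cur.reverse :: acc)
            else PySem.Chars.splitOn.go [' '] f rest (c :: cur) acc) = _
      by_cases hc : c = ' '
      · subst hc
        rw [if_pos (by simp [List.isPrefixOf])]
        simp only [List.length_singleton, List.drop_succ_cons, List.drop_zero]
        rw [ih _ _ _ (by omega)]
        cases hs : split1 rest with
        | nil => exact absurd hs (split1_ne_nil rest)
        | cons w ws =>
          simp only [split1, hs]
          simp
      · rw [if_neg (by simp [List.isPrefixOf]; exact fun h' => absurd h'.symm hc)]
        rw [ih _ _ _ (by omega)]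
        cases hs : split1 rest with
        | nil => exact absurd hs (split1_ne_nil rest)
        | cons w ws =>
          simp only [split1, if_neg hc, hs]
          simp

theorem splitOn_eq_split1 (cs : List Char) :
    PySem.Chars.splitOn cs [' '] = split1 cs := by
  unfold PySem.Chars.splitOn
  rw [go_eq_split1 _ _ _ _ (by omega)]
  cases hs : split1 cs with
  | nil => exact absurd hs (split1_ne_nil cs)
  | cons w ws => simp


theorem split1_runs (cs : List Char) :
    split1 cs = cs.takeWhile (· ≠ ' ') ::
      (match cs.dropWhile (· ≠ ' ') with
       | [] => []
       | _ :: r => split1 r) := by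
  induction cs with
  | nil => simp [split1]
  | cons c rest ih =>
    by_cases hc : c = ' '
    · subst hc
      simp [split1]
    · simp only [split1, if_neg hc, List.takeWhile_cons, List.dropWhile_cons]
      rw [if_pos (by simp [hc]), if_pos (by simp [hc])]
      rw [ih]

theorem join_map_split1_eq_scanB (cs : List Char) :
    PySem.Chars.join [' '] ((split1 cs).map swapRunB) = scanB cs := by
  cases h : cs with
  | nil =>
    rw [scanB_nil]
    simp [split1, PySem.Chars.join_singleton, swapRunB]
  | cons c rest =>
    rw [scanB_cons]
    by_cases hc : c = ' '
    · subst hc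
      rw [if_pos rfl]
      rw [show split1 (' ' :: rest) = [] :: split1 rest from by simp [split1]]
      cases hs : split1 rest with
      | nil => exact absurd hs (split1_ne_nil rest)
      | cons w ws =>
        rw [List.map_cons, show swapRunB [] = [] from by simp [swapRunB],
            List.map_cons, PySem.Chars.join_cons_cons, ← List.map_cons, ← hs,
            join_map_split1_eq_scanB rest]
        simp
    · rw [if_neg hc, split1_runs (c :: rest)]
      cases hd : (c :: rest).dropWhile (· ≠ ' ') with
      | nil =>
        simp only [List.map_cons, List.map_nil, PySem.Chars.join_singleton, scanB_nil]
        simp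
      | cons x r =>
        have hx : x = ' ' := by
          have hne : (c :: rest).dropWhile (· ≠ ' ') ≠ [] := by rw [hd]; simp
          have hh := List.head_dropWhile_not (· ≠ ' ') hne
          simp only [hd, List.head_cons] at hh
          simpa using hh
        have hlen : r.length < (c :: rest).length := by
          have h1 : (x :: r).length ≤ rest.length := by
            rw [← hd]
            simp only [List.dropWhile_cons, if_pos (by simp [hc] : ((fun x => x ≠ ' ') c : Bool) = true)]
            exact List.length_dropWhile_le _ _
          simp only [List.length_cons] at *
          omega
        have hm : (match x :: r with
                   | [] => ([] : List (List Char))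
                   | _ :: r => split1 r) = split1 r := rfl
        rw [hm]
        cases hs : split1 r with
        | nil => exact absurd hs (split1_ne_nil r)
        | cons w ws =>
          rw [List.map_cons, List.map_cons, PySem.Chars.join_cons_cons,
              ← List.map_cons, ← hs, join_map_split1_eq_scanB r, scanB_cons]
          subst hx
          simp
termination_by cs.length
decreasing_by
  · simp
  · simp
    simp only [List.length_cons] at hlen
    omega

-- the two word transforms agree
theorem wordA_eq_swapRunB (w : List Char) :
    (if 1 < w.length then
      (PySem.List.pyGet? w (-1)).toList
        ++ PySem.List.slice w (some 1) (some ((w.length : Int) - 1))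
        ++ (PySem.List.pyGet? w 0).toList
     else w) = swapRunB w := by
  unfold swapRunB
  by_cases h : 1 < w.length
  · rw [if_pos h, if_neg (by omega)]
    have hslice : PySem.List.slice w (some 1) (some ((w.length : Int) - 1))
        = PySem.List.slice w (some 1) (some (-1)) := by
      unfold PySem.List.slice PySem.List.clampIdx
      have hne : w ≠ [] := by intro e; simp [e] at h
      have h1 : ¬ ((w.length : Int) - 1 < 0) := by omega
      norm_num [h1, hne]
      congr 1
      omega
    rw [hslice]
  · rw [if_neg h, if_pos (by omega)]

-- ===== VERDICT (by name: the statement is the Claim_ definition above) =====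
theorem swap_py_spec : Claim_equal_swap_py := by
  intro s _
  unfold Spec_swap_py swap_py swap_py_alt
  simp only [splitOn_eq_split1]
  rw [show (fun (acc : List (List Char)) (word : List Char) =>
        if 1 < word.length then
          acc ++ [(PySem.List.pyGet? word (-1)).toList
                  ++ PySem.List.slice word (some 1) (some ((word.length : Int) - 1))
                  ++ (PySem.List.pyGet? word 0).toList]
        else acc ++ [word])
      = (fun acc word => acc ++ [swapRunB word]) from by
        funext acc word
        rw [← wordA_eq_swapRunB word]
        split <;> rfl]
  rw [PySem.List.foldl_append_singleton_eq_map swapRunB _ []]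
  rw [List.nil_append, join_map_split1_eq_scanB]
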